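-- pv_equiv track=rewrite | github.com/Pzzzzz5142/animal-forest-QQ-group-bot | utils.py | swFormatter
-- ===== SOURCE A (Python) =====
-- def isdigit(c: str) -> bool:
--     try:
--         c = int(c)
--     except:
--         return False
--     return True
--
-- def swFormatter(thing: str):
--     pre = None
--     sw = ""
--
--     for i in range(len(thing)):
--         if isdigit(thing[i]):
--             sw += thing[i]
--         elif thing[i] not in [" ", "-"]:
--             sw = ""
--
--     if sw == "" or len(sw) != 12:
--         sw = "-1"
--
--     return sw
-- ===== SOURCE B (Python) =====
-- def isdigit(c: str) -> bool:
--     try: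
--         c = int(c)
--     except:
--         return False
--     return True
--
-- def swFormatter(thing: str):
--     # single reverse pass: collect digits from the right, stop at the first
--     # non-digit non-separator (i.e. the last "reset" character of A's loop)
--     digits = []
--     for c in reversed(thing):
--         if isdigit(c):
--             digits.append(c)
--         elif c not in [" ", "-"]:
--             break
--     sw = "".join(reversed(digits))
--     return sw if len(sw) == 12 else "-1"
-- ===== Notes on version B (the rewrite author's own statement) =====
-- stated objective: alternative
-- what changed: Replaces A's left-to-right accumulate-and-reset loop by a single right-to-left scan that collects digits and stops at the first non-digit non-separator, so characters before the last reset point are never touched.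
import Mathlib
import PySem

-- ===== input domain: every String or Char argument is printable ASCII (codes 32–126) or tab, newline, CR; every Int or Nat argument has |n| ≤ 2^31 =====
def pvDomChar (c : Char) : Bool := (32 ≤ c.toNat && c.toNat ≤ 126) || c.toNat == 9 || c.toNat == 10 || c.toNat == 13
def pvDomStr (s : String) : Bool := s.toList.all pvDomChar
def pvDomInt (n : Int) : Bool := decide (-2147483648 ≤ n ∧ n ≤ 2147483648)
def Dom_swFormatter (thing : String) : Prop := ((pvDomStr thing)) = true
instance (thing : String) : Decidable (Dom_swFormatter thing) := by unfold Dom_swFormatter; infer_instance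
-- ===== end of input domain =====

-- ===== PORT A =====
def pyIsdigit (c : Char) : Bool := (PySem.Int.ofStr? (String.mk [c])).isSome

def swFormatterStep (sw : List Char) (c : Char) : List Char :=
  if pyIsdigit c then sw ++ [c]
  else if c = ' ' ∨ c = '-' then sw
  else []

def swFormatter (thing : String) : String :=
  let sw := thing.toList.foldl swFormatterStep []
  if sw = [] ∨ sw.length ≠ 12 then "-1" else String.mk sw

-- ===== PORT B =====
def swGo : List Char → List Char → List Char
  | [], acc => acc.reverse
  | c :: rest, acc =>
    if pyIsdigit c then swGo rest (acc ++ [c])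
    else if c = ' ' ∨ c = '-' then swGo rest acc
    else acc.reverse

def swFormatter_alt (thing : String) : String :=
  let sw := swGo thing.toList.reverse []
  if sw.length = 12 then String.mk sw else "-1"

-- ===== PRECONDITION & SPEC =====
def Spec_swFormatter (thing : String) (out : String) : Prop := out = swFormatter_alt thing
instance (thing : String) (out : String) : Decidable (Spec_swFormatter thing out) := by unfold Spec_swFormatter; infer_instance

-- ===== CLAIM (what is proved, stated in full; the proofs are below) =====
def Claim_equal_swFormatter : Prop := ∀ (thing : String), Dom_swFormatter thing → Spec_swFormatter thing (swFormatter thing)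

-- ===== LEMMAS AND PROOFS =====

-- ===== VERDICT (by name: the statement is the Claim_ definition above) =====
lemma swGo_reverse (l : List Char) : ∀ acc : List Char,
    swGo l.reverse acc = l.foldl swFormatterStep [] ++ acc.reverse := by
  induction l using List.reverseRecOn with
  | nil => intro acc; simp [swGo]
  | append_singleton l c ih =>
    intro acc
    rw [List.reverse_append]
    simp only [List.reverse_singleton, List.singleton_append, List.foldl_append, List.foldl_cons,
      List.foldl_nil, swGo, swFormatterStep]
    by_cases hd : pyIsdigit c
    · simp [hd, ih]
    · by_cases hs : c = ' ' ∨ c = '-'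
      · simp [hd, hs, ih]
      · simp [hd, hs]

theorem swFormatter_spec : Claim_equal_swFormatter := by
  intro thing _
  unfold Spec_swFormatter swFormatter swFormatter_alt
  rw [swGo_reverse]
  simp only [List.reverse_nil, List.append_nil]
  set sw := thing.toList.foldl swFormatterStep [] with hsw
  by_cases h : sw.length = 12
  · have hne : sw ≠ [] := by intro h0; rw [h0] at h; simp at h
    simp [h, hne]
  · simp [h]
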